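-- pv_equiv track=rewrite | github.com/PhraxayaM/CS-1.2-How-Data-Structures-Work | histogram-tuple.py | list_count
-- ===== SOURCE A (Python) =====
-- def list_count(word_list):
--     big_list = []
--
--     for word in word_list:
--         for baby_tuple in big_list:
--             if word == baby_tuple[0]:
--                 count = baby_tuple[1]
--                 new_tuple = (word, count+1)
--                 #remove the old tuple
--                 big_list.remove(baby_tuple)
--
--                 #add the new tuple to big list
--                 big_list.append(new_tuple)
--
--                 # stop iterating if you come across word
--                 break
--         # If we dont come across word, add word
--         else:
--             tuple_to_append = (word, 1)
--             big_list.append(tuple_to_append)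
--     return big_list
-- ===== SOURCE B (Python) =====
-- def list_count(word_list):
--     word_list = list(word_list)
--     counts = {}
--     for w in word_list:
--         counts[w] = counts.get(w, 0) + 1
--     seen = set()
--     rev_order = []
--     for w in reversed(word_list):
--         if w not in seen:
--             seen.add(w)
--             rev_order.append(w)
--     return [(w, counts[w]) for w in reversed(rev_order)]
-- ===== Notes on version B (the rewrite author's own statement) =====
-- stated objective: faster
-- what changed: Replaced A's per-word inner scan-remove-append over the growing result list by one dict counting pass plus one reversed seen-set pass that computes the last-occurrence order, then a single map to (word,count) tuples.
import Mathlib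
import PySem

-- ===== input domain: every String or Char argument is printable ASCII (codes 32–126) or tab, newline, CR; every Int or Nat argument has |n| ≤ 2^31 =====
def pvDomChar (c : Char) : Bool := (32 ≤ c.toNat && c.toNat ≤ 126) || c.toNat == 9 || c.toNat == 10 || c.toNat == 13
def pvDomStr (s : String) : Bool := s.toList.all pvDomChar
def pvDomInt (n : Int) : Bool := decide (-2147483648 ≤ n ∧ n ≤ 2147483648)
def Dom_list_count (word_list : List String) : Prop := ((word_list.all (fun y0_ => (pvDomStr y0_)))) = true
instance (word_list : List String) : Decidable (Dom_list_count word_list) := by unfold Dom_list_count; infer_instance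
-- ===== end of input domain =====

-- ===== PORT A =====
-- A's inner 'for baby_tuple in big_list: … break / else: append' for one word
def listCountStep (big : List (String × Int)) (word : String) : List (String × Int) :=
  match big.find? (fun t => t.1 == word) with
  | some t => ((PySem.List.remove? big t).getD big) ++ [(word, t.2 + 1)]
  | none => big ++ [(word, 1)]

def list_count (word_list : List String) : List (String × Int) :=
  word_list.foldl listCountStep []

-- ===== PORT B =====
-- B counts in one dict pass, derives the last-occurrence order by a reversed seen-set pass, then maps; faster: no inner scan.
def list_count_alt (word_list : List String) : List (String × Int) :=
  let counts : PySem.Dict String Int :=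
    word_list.foldl (fun d w => d.insert w (d.getD w 0 + 1)) PySem.Dict.empty
  let revOrder :=
    (word_list.reverse.foldl
      (fun (st : PySem.Set String × List String) w =>
        if w ∈ st.1 then st else (PySem.Set.add st.1 w, st.2 ++ [w]))
      ((PySem.Set.empty : PySem.Set String), ([] : List String))).2
  -- counts[w]: w is drawn from word_list, so the key is always present; getD is exact here
  revOrder.reverse.map (fun w => (w, counts.getD w 0))

-- ===== PRECONDITION & SPEC =====
def Spec_list_count (word_list : List String) (out : List (String × Int)) : Prop := out = list_count_alt word_list
instance (word_list : List String) (out : List (String × Int)) : Decidable (Spec_list_count word_list out) := by unfold Spec_list_count; infer_instance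

-- ===== CLAIM (what is proved, stated in full; the proofs are below) =====
def Claim_equal_list_count : Prop := ∀ (word_list : List String), Dom_list_count word_list → Spec_list_count word_list (list_count word_list)

-- ===== LEMMAS AND PROOFS =====

-- the order of A's result: each word at its LAST occurrence position (first occurrence of the reversed list, reversed)
def lcOrder (l : List String) : List String := (PySem.Set.ofList l.reverse).reverse

-- the common value of both programs
def lcModel (l : List String) : List (String × Int) :=
  (lcOrder l).map (fun u => (u, (l.count u : Int)))

theorem foldl_add_skip (w : String) :
    ∀ (xs s : List String), w ∈ s →
      xs.foldl PySem.Set.add s = (xs.filter (fun u => u != w)).foldl PySem.Set.add s := by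
  intro xs
  induction xs with
  | nil => intro s _; rfl
  | cons x xs ih =>
      intro s hw
      by_cases hx : x = w
      · subst hx
        have hc : PySem.Set.contains s x = true := (PySem.Set.contains_iff s x).mpr hw
        simp only [List.foldl_cons, List.filter_cons, bne_self_eq_false, if_neg, Bool.false_eq_true,
          not_false_eq_true, PySem.Set.add, hc, if_true]
        exact ih s hw
      · have hb : (x != w) = true := by simp [hx]
        simp only [List.foldl_cons, List.filter_cons, hb, if_true]
        exact ih _ ((PySem.Set.mem_add s x w).mpr (Or.inl hw))

theorem foldl_add_cons (w : String) :
    ∀ (xs s : List String), w ∉ xs →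
      xs.foldl PySem.Set.add (w :: s) = w :: xs.foldl PySem.Set.add s := by
  intro xs
  induction xs with
  | nil => intro s _; rfl
  | cons x xs ih =>
      intro s hw
      have hxw : x ≠ w := fun h => hw (h ▸ List.mem_cons_self ..)
      have hw' : w ∉ xs := fun h => hw (List.mem_cons_of_mem _ h)
      have hstep : PySem.Set.add (w :: s) x = w :: PySem.Set.add s x := by
        by_cases hxs : x ∈ s
        · simp [PySem.Set.add, hxs]
        · simp [PySem.Set.add, hxs, hxw]
      simp only [List.foldl_cons, hstep]
      exact ih _ hw' 

theorem foldl_add_filter (w : String) :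
    ∀ (xs s : List String),
      (xs.filter (fun u => u != w)).foldl PySem.Set.add (s.filter (fun u => u != w))
        = (xs.foldl PySem.Set.add s).filter (fun u => u != w) := by
  intro xs
  induction xs with
  | nil => intro s; rfl
  | cons x xs ih =>
      intro s
      by_cases hx : x = w
      · subst hx
        have hadd : (PySem.Set.add s x).filter (fun u => u != x) = s.filter (fun u => u != x) := by
          by_cases hxs : x ∈ s
          · simp [PySem.Set.add, hxs]
          · simp [PySem.Set.add, hxs, List.filter_append]
        simp only [List.filter_cons, bne_self_eq_false, Bool.false_eq_true, not_false_eq_true,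
          if_neg, List.foldl_cons, ← hadd]
        exact ih _
      · have hb : (x != w) = true := by simp [hx]
        have hadd : PySem.Set.add (s.filter (fun u => u != w)) x
            = (PySem.Set.add s x).filter (fun u => u != w) := by
          by_cases hxs : x ∈ s
          · simp [PySem.Set.add, List.mem_filter, hxs, hb]
          · simp [PySem.Set.add, List.mem_filter, hxs, List.filter_append, hb]
        simp only [List.filter_cons, hb, if_true, List.foldl_cons, hadd]
        exact ih _

theorem ofList_cons_key (w : String) (xs : List String) :
    PySem.Set.ofList (w :: xs) = w :: (PySem.Set.ofList xs).filter (fun u => u != w) := by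
  rw [PySem.Set.ofList_eq_foldl, PySem.Set.ofList_eq_foldl]
  have h0 : List.foldl PySem.Set.add [] (w :: xs) = List.foldl PySem.Set.add [w] xs := by
    simp only [List.foldl_cons]; rfl
  rw [h0, foldl_add_skip w xs [w] (List.mem_singleton.mpr rfl)]
  have h1 : w ∉ xs.filter (fun u => u != w) := by simp
  rw [show ([w] : List String) = w :: ([] : List String) from rfl,
    foldl_add_cons w _ [] h1]
  have h2 := foldl_add_filter w xs []
  simpa using h2

theorem lcOrder_append (p : List String) (w : String) :
    lcOrder (p ++ [w]) = (lcOrder p).filter (fun u => u != w) ++ [w] := by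
  simp [lcOrder, ofList_cons_key, List.filter_reverse]

theorem mem_lcOrder {u : String} {l : List String} : u ∈ lcOrder l ↔ u ∈ l := by
  simp [lcOrder, PySem.Set.mem_ofList]

theorem nodup_lcOrder (l : List String) : (lcOrder l).Nodup := by
  simp [lcOrder, PySem.Set.nodup_ofList]

theorem find?_map_key (w : String) (g : String → Int) :
    ∀ (l : List String), l.Nodup → w ∈ l →
      List.find? (fun t => t.1 == w) (l.map (fun u => (u, g u))) = some (w, g w) := by
  intro l
  induction l with
  | nil => intro _ h; simp at h
  | cons u l ih =>
      intro hnd hm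
      by_cases hu : u = w
      · subst hu; simp
      · have hm' : w ∈ l := by
          rcases List.mem_cons.mp hm with h | h
          · exact absurd h.symm hu
          · exact h
        have hb : ((u, g u).1 == w) = false := by simp [hu]
        simp only [List.map_cons, List.find?_cons, hb]
        exact ih (List.Nodup.of_cons hnd) hm' 

theorem remove?_map_key (w : String) (g : String → Int) :
    ∀ (l : List String), l.Nodup → w ∈ l →
      PySem.List.remove? (l.map (fun u => (u, g u))) (w, g w)
        = some (((l.filter (fun u => u != w))).map (fun u => (u, g u))) := by
  intro l
  induction l with
  | nil => intro _ h; simp at h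
  | cons u l ih =>
      intro hnd hm
      by_cases hu : u = w
      · subst hu
        have hul : u ∉ l := (List.nodup_cons.mp hnd).1
        have hfl : l.filter (fun v => v != u) = l :=
          List.filter_eq_self.mpr (fun x hx => by
            simp only [bne_iff_ne, ne_eq]
            exact fun h => hul (h ▸ hx))
        simp [PySem.List.remove?_cons_self, hfl]
      · have hm' : w ∈ l := by
          rcases List.mem_cons.mp hm with h | h
          · exact absurd h.symm hu
          · exact h
        have hne : (u, g u) ≠ (w, g w) := fun h => hu (congrArg Prod.fst h)
        have hb : (u != w) = true := by simp [hu]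
        rw [List.map_cons, PySem.List.remove?_cons_of_ne _ hne,
          ih (List.Nodup.of_cons hnd) hm']
        simp [hb]

theorem step_model (p : List String) (w : String) :
    listCountStep (lcModel p) w = lcModel (p ++ [w]) := by
  by_cases hw : w ∈ p
  · have hmem : w ∈ lcOrder p := mem_lcOrder.mpr hw
    have hfind := find?_map_key w (fun u => (p.count u : Int)) (lcOrder p) (nodup_lcOrder p) hmem
    have hrem := remove?_map_key w (fun u => (p.count u : Int)) (lcOrder p) (nodup_lcOrder p) hmem
    simp only [listCountStep, lcModel, hfind, hrem, Option.getD_some]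
    rw [lcOrder_append, List.map_append]
    congr 1
    · apply List.map_congr_left
      intro u hu
      have hne : u ≠ w := by simpa using (List.mem_filter.mp hu).2
      simp [List.count_append, List.count_eq_zero, hne]
    · simp [List.count_append]
  · have hfind : List.find? (fun t => t.1 == w)
        ((lcOrder p).map (fun u => (u, (p.count u : Int)))) = none := by
      rw [List.find?_eq_none]
      intro t ht
      obtain ⟨u, hu, rfl⟩ := List.mem_map.mp ht
      have : u ∈ p := mem_lcOrder.mp hu
      simp only [beq_iff_eq]
      exact fun h => hw (h ▸ this)
    have hcz : p.count w = 0 := List.count_eq_zero.mpr hw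
    have hfl : (lcOrder p).filter (fun u => u != w) = lcOrder p :=
      List.filter_eq_self.mpr (fun u hu => by
        have : u ∈ p := mem_lcOrder.mp hu
        simp only [bne_iff_ne, ne_eq]
        exact fun h => hw (h ▸ this))
    simp only [listCountStep, lcModel, hfind]
    rw [lcOrder_append, hfl, List.map_append]
    congr 1
    · apply List.map_congr_left
      intro u hu
      have hne : u ≠ w := fun h => hw (h ▸ mem_lcOrder.mp hu)
      simp [List.count_append, List.count_eq_zero, hne]
    · simp [List.count_append, hcz]

theorem A_loop : ∀ (l p : List String), l.foldl listCountStep (lcModel p) = lcModel (p ++ l) := by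
  intro l
  induction l with
  | nil => intro p; simp
  | cons x xs ih =>
      intro p
      have : (p ++ x :: xs) = (p ++ [x]) ++ xs := by simp
      rw [this, ← ih (p ++ [x])]
      simp [List.foldl_cons, step_model]

theorem A_eq_model (l : List String) : list_count l = lcModel l := by
  have h := A_loop l []
  simpa [list_count, lcModel, lcOrder, PySem.Set.ofList] using h

theorem pairfold :
    ∀ (xs s : List String),
      xs.foldl (fun (st : PySem.Set String × List String) w =>
          if w ∈ st.1 then st else (PySem.Set.add st.1 w, st.2 ++ [w])) (s, s)
        = (xs.foldl PySem.Set.add s, xs.foldl PySem.Set.add s) := by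
  intro xs
  induction xs with
  | nil => intro s; rfl
  | cons x xs ih =>
      intro s
      by_cases hx : x ∈ s
      · have ha : PySem.Set.add s x = s := by simp [PySem.Set.add, hx]
        simp only [List.foldl_cons, if_pos hx, ha]
        exact ih s
      · have ha : PySem.Set.add s x = s ++ [x] := by simp [PySem.Set.add, hx]
        simp only [List.foldl_cons, if_neg hx, ha]
        exact ih (s ++ [x])

theorem B_eq_model (l : List String) : list_count_alt l = lcModel l := by
  simp only [list_count_alt]
  rw [show ((PySem.Set.empty : PySem.Set String), ([] : List String))
        = (([] : List String), ([] : List String)) from rfl]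
  rw [pairfold l.reverse [], PySem.Dict.foldl_insert_getD_add_one_eq_counter,
    ← PySem.Set.ofList_eq_foldl]
  apply List.map_congr_left
  intro u _
  simp [PySem.Dict.getD_counter]

-- ===== VERDICT (by name: the statement is the Claim_ definition above) =====
theorem list_count_spec : Claim_equal_list_count := by
  intro wl _
  unfold Spec_list_count
  rw [A_eq_model, B_eq_model]
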